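-- pv_equiv track=rewrite | github.com/flyingaura/PythonLearning | PY.exercise/testcode006.py | all_answers
-- ===== SOURCE A (Python) =====
-- def all_answers(TitleCount,AnsList):
--     AnswersCollection = []
--     try:
--         AnsCount = len(AnsList)
--     except TypeError :
--         raise TypeError('第二个参数类型错误，必须为字符串、列表或元组类型！')
--     if(not isinstance(TitleCount, int)):
--         raise TypeError('第一个参数类型错误，必须为整数！')
--     if(TitleCount == 1):
--         for i in range(AnsCount):
--             AnswersCollection.append({'title' + str(TitleCount): AnsList[i]})
--         return AnswersCollection
--     elif(TitleCount > 1):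
--         for AnAnswerGroup in all_answers(TitleCount - 1, AnsList):
--             for i in range(AnsCount):
--                 AnAnswerGroup['title' + str(TitleCount)] = AnsList[i]
--                 AnswersCollection.append(AnAnswerGroup.copy())
--         return AnswersCollection
--     else:
--         raise ValueError('第一个参数值域错误，必须为>1的正整数！')
-- ===== SOURCE B (Python) =====
-- def all_answers(TitleCount, AnsList):
--     try:
--         len(AnsList)
--     except TypeError:
--         raise TypeError('第二个参数类型错误，必须为字符串、列表或元组类型！')
--     if not isinstance(TitleCount, int):
--         raise TypeError('第一个参数类型错误，必须为整数！')
--     if TitleCount < 1: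
--         raise ValueError('第一个参数值域错误，必须为>1的正整数！')
--     result = [{'title1': a} for a in AnsList]
--     for t in range(2, TitleCount + 1):
--         result = [{**g, 'title' + str(t): a} for g in result for a in AnsList]
--     return result
-- ===== Notes on version B (the rewrite author's own statement) =====
-- stated objective: simpler
-- what changed: Replaces A's recursion on TitleCount (with dict mutation and explicit copy inside nested loops) by an iterative bottom-up build: seed one-key dicts, then one comprehension per extra title extends every group with each answer.
import Mathlib
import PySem

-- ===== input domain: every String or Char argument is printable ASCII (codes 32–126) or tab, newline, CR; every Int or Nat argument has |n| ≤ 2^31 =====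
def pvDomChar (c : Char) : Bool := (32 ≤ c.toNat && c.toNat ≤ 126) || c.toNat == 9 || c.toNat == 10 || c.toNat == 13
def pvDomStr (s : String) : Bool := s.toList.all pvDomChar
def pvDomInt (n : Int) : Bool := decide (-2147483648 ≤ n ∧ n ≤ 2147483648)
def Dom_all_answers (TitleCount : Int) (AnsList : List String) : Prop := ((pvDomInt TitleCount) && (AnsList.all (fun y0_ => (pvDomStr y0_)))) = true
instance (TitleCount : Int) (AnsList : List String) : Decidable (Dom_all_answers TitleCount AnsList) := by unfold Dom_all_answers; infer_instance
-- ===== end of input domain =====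

-- B replaces A's recursion on TitleCount by an iterative bottom-up build of the product (simpler decomposition, same cost).

-- ===== PORT A =====
-- Python dict assignment d[k] = v on an insertion-ordered assoc list (exact via PySem.Dict).
def pvSetItem (g : List (String × String)) (k v : String) : List (String × String) :=
  ((PySem.Dict.ofList g).insert k v).items

def all_answers (TitleCount : Int) (AnsList : List String) : List (List (String × String)) :=
  if TitleCount = 1 then
    -- for i in range(AnsCount): AnswersCollection.append({'title'+str(TitleCount): AnsList[i]})
    (PySem.List.pyRange 0 (AnsList.length : Int) 1).foldl
      (fun acc i => acc ++ [[("title" ++ PySem.Int.toStr TitleCount, PySem.List.pyGetD AnsList i "")]]) []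
  else if 1 < TitleCount then
    (all_answers (TitleCount - 1) AnsList).foldl
      (fun acc g =>
        (PySem.List.pyRange 0 (AnsList.length : Int) 1).foldl
          (fun acc2 i =>
            acc2 ++ [pvSetItem g ("title" ++ PySem.Int.toStr TitleCount) (PySem.List.pyGetD AnsList i "")])
          acc)
      []
  else [] -- Python raises ValueError here; excluded by Pre_all_answers
termination_by TitleCount.toNat
decreasing_by omega

-- ===== PORT B =====
def all_answers_alt (TitleCount : Int) (AnsList : List String) : List (List (String × String)) :=
  if TitleCount < 1 then [] -- Python raises ValueError here; excluded by Pre_all_answers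
  else
    (PySem.List.pyRange 2 (TitleCount + 1) 1).foldl
      (fun res t =>
        res.flatMap (fun g =>
          AnsList.map (fun a => ((PySem.Dict.ofList g).insert ("title" ++ PySem.Int.toStr t) a).items)))
      (AnsList.map (fun a => [("title1", a)]))

-- ===== PRECONDITION & SPEC =====
-- A raises ValueError when TitleCount < 1; those inputs are excluded.
def Pre_all_answers (TitleCount : Int) (AnsList : List String) : Prop := 1 ≤ TitleCount
instance (TitleCount : Int) (AnsList : List String) : Decidable (Pre_all_answers TitleCount AnsList) := by
  unfold Pre_all_answers; infer_instance
def pvWitness_all_answers : Int × List String := (2, ["a", "b"])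

def Spec_all_answers (TitleCount : Int) (AnsList : List String) (out : List (List (String × String))) : Prop := out = all_answers_alt TitleCount AnsList
instance (TitleCount : Int) (AnsList : List String) (out : List (List (String × String))) : Decidable (Spec_all_answers TitleCount AnsList out) := by unfold Spec_all_answers; infer_instance

-- ===== CLAIM (what is proved, stated in full; the proofs are below) =====
def Claim_equal_all_answers : Prop := ∀ (TitleCount : Int) (AnsList : List String), Dom_all_answers TitleCount AnsList → Pre_all_answers TitleCount AnsList → Spec_all_answers TitleCount AnsList (all_answers TitleCount AnsList)

-- ===== LEMMAS AND PROOFS =====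

-- one extension step, shared shape of both ports
def pvStep (t : Int) (AnsList : List String) (gs : List (List (String × String))) : List (List (String × String)) :=
  gs.flatMap (fun g =>
    AnsList.map (fun a => ((PySem.Dict.ofList g).insert ("title" ++ PySem.Int.toStr t) a).items))

lemma all_answers_one (AnsList : List String) :
    all_answers 1 AnsList = AnsList.map (fun a => [("title1", a)]) := by
  rw [all_answers]
  rw [if_pos rfl]
  rw [PySem.List.foldl_pyRange_zero_pyGetD' AnsList ""
      (fun acc x => acc ++ [[("title" ++ PySem.Int.toStr 1, x)]]) []]
  rw [PySem.List.foldl_append_singleton_eq_map]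
  rfl

lemma all_answers_step (t : Int) (ht : 1 < t) (AnsList : List String) :
    all_answers t AnsList = pvStep t AnsList (all_answers (t - 1) AnsList) := by
  rw [all_answers]
  rw [if_neg (by omega), if_pos ht]
  rw [PySem.List.foldl_congr_mem
      (g := fun acc g => acc ++ AnsList.map (fun a =>
        ((PySem.Dict.ofList g).insert ("title" ++ PySem.Int.toStr t) a).items))
      (h := by
        intro acc g _
        rw [PySem.List.foldl_pyRange_zero_pyGetD' AnsList ""
            (fun acc2 x => acc2 ++ [pvSetItem g ("title" ++ PySem.Int.toStr t) x]) acc]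
        rw [PySem.List.foldl_append_singleton_eq_map]
        rfl)]
  rw [PySem.List.foldl_append_eq_flatMap]
  rfl

lemma all_answers_alt_one (AnsList : List String) :
    all_answers_alt 1 AnsList = AnsList.map (fun a => [("title1", a)]) := by
  rw [all_answers_alt]
  rw [if_neg (by omega), PySem.List.pyRange_one_eq_nil (by omega)]
  rfl

lemma all_answers_alt_step (t : Int) (ht : 1 < t) (AnsList : List String) :
    all_answers_alt t AnsList = pvStep t AnsList (all_answers_alt (t - 1) AnsList) := by
  rw [all_answers_alt, all_answers_alt]
  rw [if_neg (by omega), if_neg (by omega)]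
  have hsplit : PySem.List.pyRange 2 (t + 1) 1 =
      PySem.List.pyRange 2 (t - 1 + 1) 1 ++ [t] := by
    have := PySem.List.pyRange_one_succ_right (a := 2) (b := t) (by omega)
    simpa using this
  rw [hsplit, List.foldl_append]
  rfl

lemma all_answers_eq (t : Int) (ht : 1 ≤ t) (AnsList : List String) :
    all_answers t AnsList = all_answers_alt t AnsList := by
  induction t, ht using Int.le_induction with
  | base => rw [all_answers_one, all_answers_alt_one]
  | succ n hn ih =>
      rw [all_answers_step (n + 1) (by omega), all_answers_alt_step (n + 1) (by omega)]
      simpa using congrArg (pvStep (n + 1) AnsList) ih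

-- ===== VERDICT (by name: the statement is the Claim_ definition above) =====
theorem all_answers_spec : Claim_equal_all_answers := by
  intro t l _ hpre
  exact all_answers_eq t hpre l
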